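-- pv_equiv track=rewrite | github.com/Myrrolinz/Data-Security | lab4/vote/ss_function.py | restructure_polynomial
-- ===== SOURCE A (Python) =====
-- def quickpower(a,b,p):
--     a=a%p
--     ans=1
--     while b!=0:
--         if b&1:
--             ans=(ans*a)%p
--         b>>=1
--         a=(a*a)%p
--     return ans
--
-- def restructure_polynomial(x,fx,t,p):
--     ans=0
--     #利用多项式插值法计算出 x=0 时多项式的值
--     for i in range(0,t):
--         fx[i]=fx[i]%p
--         fxi=1
--         #在模 p 下，(a/b)%p=(a*c)%p，其中 c 为 b 在模 p 下的逆元，c=b^(p-2)%p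
--         for j in range(0,t):
--             if j !=i:
--                 fxi=(-1*fxi*x[j]*quickpower(x[i]-x[j],p-2,p))%p
--         fxi=(fxi*fx[i])%p
--         ans=(ans+fxi)%p
--     return ans
-- ===== SOURCE B (Python) =====
-- def quickpower(a, b, p):
--     a = a % p
--     ans = 1
--     while b != 0:
--         if b & 1:
--             ans = (ans * a) % p
--         b >>= 1
--         a = (a * a) % p
--     return ans
--
-- def restructure_polynomial(x, fx, t, p):
--     # One modular exponentiation per basis polynomial: accumulate the numerator
--     # product and the denominator product separately, invert the denominator once.
--     ans = 0
--     for i in range(t):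
--         fx[i] = fx[i] % p  # same in-place reduction as the original
--         num = 1
--         den = 1
--         xi = x[i]
--         for j in range(t):
--             if j != i:
--                 num = (-x[j] * num) % p
--                 den = (den * (xi - x[j])) % p
--         ans = (ans + fx[i] * num % p * quickpower(den, p - 2, p)) % p
--     return ans
-- ===== Notes on version B (the rewrite author's own statement) =====
-- stated objective: faster
-- what changed: Instead of one modular exponentiation per inner-loop factor, B accumulates the numerator product and denominator product over j and performs a single modular exponentiation per outer iteration (t exponentiations total instead of t*(t-1)), relying on (ab)^(p-2) = a^(p-2) b^(p-2) mod p.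
-- outside the precondition, e.g. on restructure_polynomial([5], [7], 1, 1): A returns 0, B does not finish within the time limit; on restructure_polynomial([5], [7], 1, -3): A returns -2, B does not finish within the time limit
import Mathlib
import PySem

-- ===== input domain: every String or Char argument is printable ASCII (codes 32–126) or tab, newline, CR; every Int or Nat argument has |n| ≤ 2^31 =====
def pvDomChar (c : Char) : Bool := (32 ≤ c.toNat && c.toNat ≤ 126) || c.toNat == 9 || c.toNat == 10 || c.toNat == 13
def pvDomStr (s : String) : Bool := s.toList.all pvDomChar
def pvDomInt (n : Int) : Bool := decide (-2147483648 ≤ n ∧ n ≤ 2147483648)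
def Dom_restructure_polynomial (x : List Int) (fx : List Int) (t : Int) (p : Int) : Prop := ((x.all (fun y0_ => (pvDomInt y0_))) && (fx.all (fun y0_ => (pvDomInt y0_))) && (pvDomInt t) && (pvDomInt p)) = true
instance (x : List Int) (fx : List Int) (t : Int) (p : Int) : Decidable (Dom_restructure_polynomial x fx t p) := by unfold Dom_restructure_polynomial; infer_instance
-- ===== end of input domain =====

-- B replaces A's per-factor modular exponentiation by one exponentiation per outer
-- iteration (numerator/denominator products accumulated first); B performs the same
-- in-place reduction fx[i] = fx[i] % p as A, so the observable mutation matches too.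

-- ===== PORT A =====
-- shared helper 'quickpower' of the module (used verbatim by both A and Source B).
-- Ported with a Nat exponent b.toNat: faithful for b ≥ 0 (the Python loop does not
-- terminate for b < 0; under Pre_ it is only called with b = p-2 ≥ 0).
def quickpowerGo (p : Int) (b : Nat) (a ans : Int) : Int :=
  if b = 0 then ans
  else quickpowerGo p (b / 2) (PySem.Int.mod (a * a) p)
        (if b % 2 = 1 then PySem.Int.mod (ans * a) p else ans)

def quickpower (a b p : Int) : Int := quickpowerGo p b.toNat (PySem.Int.mod a p) 1

def restructure_polynomial (x : List Int) (fx : List Int) (t : Int) (p : Int) : Int :=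
  (PySem.List.pyRange 0 t 1).foldl (fun ans i =>
    -- fx[i] = fx[i] % p : the stored value is read back only in this same iteration
    let fxm := PySem.Int.mod (PySem.List.pyGetD fx i 0) p
    let fxi := (PySem.List.pyRange 0 t 1).foldl (fun fxi j =>
      if j ≠ i then
        PySem.Int.mod (-1 * fxi * (PySem.List.pyGetD x j 0) *
          quickpower ((PySem.List.pyGetD x i 0) - (PySem.List.pyGetD x j 0)) (p - 2) p) p
      else fxi) 1
    PySem.Int.mod (ans + PySem.Int.mod (fxi * fxm) p) p) 0

-- ===== PORT B =====
def restructure_polynomial_alt (x : List Int) (fx : List Int) (t : Int) (p : Int) : Int :=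
  (PySem.List.pyRange 0 t 1).foldl (fun ans i =>
    let fxm := PySem.Int.mod (PySem.List.pyGetD fx i 0) p
    let xi := PySem.List.pyGetD x i 0
    let nd := (PySem.List.pyRange 0 t 1).foldl (fun nd j =>
      if j ≠ i then
        (PySem.Int.mod ((-(PySem.List.pyGetD x j 0)) * nd.1) p,
         PySem.Int.mod (nd.2 * (xi - PySem.List.pyGetD x j 0)) p)
      else nd) (1, 1)
    PySem.Int.mod (ans + PySem.Int.mod (PySem.Int.mod (fxm * nd.1) p * quickpower nd.2 (p - 2) p) p) p) 0

-- ===== PRECONDITION & SPEC =====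
-- Pre_ excludes t exceeding either list's length (Python A raises IndexError) and,
-- when the loop body runs (t ≥ 1), moduli p ≤ 1: for p = 0 A raises ZeroDivisionError,
-- and for the other p ≤ 1 either A itself diverges in quickpower (t ≥ 2) or A returns a
-- trivial value while B's per-term exponentiation quickpower(den, p-2, p) diverges.
def Pre_restructure_polynomial (x : List Int) (fx : List Int) (t : Int) (p : Int) : Prop :=
  t ≤ x.length ∧ t ≤ fx.length ∧ (2 ≤ p ∨ t ≤ 0)
instance (x : List Int) (fx : List Int) (t : Int) (p : Int) : Decidable (Pre_restructure_polynomial x fx t p) := by unfold Pre_restructure_polynomial; infer_instance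

def pvWitness_restructure_polynomial : List Int × List Int × Int × Int := ([1, 2, 3], [4, 5, 6], 3, 7)

def Spec_restructure_polynomial (x : List Int) (fx : List Int) (t : Int) (p : Int) (out : Int) : Prop := out = restructure_polynomial_alt x fx t p
instance (x : List Int) (fx : List Int) (t : Int) (p : Int) (out : Int) : Decidable (Spec_restructure_polynomial x fx t p out) := by unfold Spec_restructure_polynomial; infer_instance

-- ===== CLAIM (what is proved, stated in full; the proofs are below) =====
def Claim_equal_restructure_polynomial : Prop := ∀ (x : List Int) (fx : List Int) (t : Int) (p : Int), Dom_restructure_polynomial x fx t p → Pre_restructure_polynomial x fx t p → Spec_restructure_polynomial x fx t p (restructure_polynomial x fx t p)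

-- ===== LEMMAS AND PROOFS =====

lemma emod_emod_self (a p : Int) : a % p % p = a % p := Int.emod_emod_of_dvd a dvd_rfl

lemma emod_pow_emod (a p : Int) (n : Nat) : (a % p) ^ n % p = a ^ n % p :=
  Int.ModEq.pow n (emod_emod_self a p)

lemma mul_emod_left' (a b p : Int) : (a % p) * b % p = a * b % p := by
  rw [Int.mul_emod, emod_emod_self, ← Int.mul_emod]

lemma mul_emod_right' (a b p : Int) : a * (b % p) % p = a * b % p := by
  rw [Int.mul_emod, emod_emod_self, ← Int.mul_emod]

lemma mul_pow_emod (a b p : Int) (n : Nat) : a * ((b % p) ^ n) % p = a * b ^ n % p := by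
  rw [Int.mul_emod, emod_pow_emod, ← Int.mul_emod]

lemma quickpowerGo_eq (p : Int) (hp : 0 < p) :
    ∀ b, b ≠ 0 → ∀ a ans : Int, quickpowerGo p b a ans = (ans * a ^ b) % p := by
  intro b
  induction b using Nat.strong_induction_on with
  | _ b ih =>
    intro hb a ans
    rw [quickpowerGo, if_neg hb]
    simp only [PySem.Int.mod_eq_emod_of_pos hp]
    by_cases h2 : b / 2 = 0
    · have hb1 : b = 1 := by omega
      subst hb1
      rw [quickpowerGo]
      norm_num
    · rw [ih (b / 2) (Nat.div_lt_self (by omega) (by omega)) h2]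
      by_cases hodd : b % 2 = 1
      · rw [if_pos hodd, mul_pow_emod, mul_emod_left']
        obtain ⟨k, hk⟩ : ∃ k, b = 2 * k + 1 := ⟨b / 2, by omega⟩
        subst hk
        have hdiv : (2 * k + 1) / 2 = k := by omega
        rw [hdiv]
        congr 1
        ring
      · rw [if_neg hodd, mul_pow_emod]
        obtain ⟨k, hk⟩ : ∃ k, b = 2 * k := ⟨b / 2, by omega⟩
        subst hk
        have hdiv : 2 * k / 2 = k := by omega
        rw [hdiv]
        congr 1
        ring

lemma quickpower_eq' (a b p : Int) (hp : 2 ≤ p) (_hb : 0 ≤ b) :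
    quickpower a b p = a ^ b.toNat % p := by
  unfold quickpower
  simp only [PySem.Int.mod_eq_emod_of_pos (show (0:Int) < p by omega)]
  by_cases h0 : b.toNat = 0
  · rw [h0, quickpowerGo]
    norm_num
    exact (Int.emod_eq_of_lt (by omega) (by omega)).symm
  · rw [quickpowerGo_eq p (by omega) _ h0, one_mul, emod_pow_emod]

-- the inner-loop invariant: A's running product ≡ (B's numerator) * (B's denominator)^e mod p
lemma inner_fold_eq (p : Int) (hp : 2 ≤ p) (i : Int) (X D : Int → Int) :
    ∀ (l : List Int) (acc n d : Int), acc % p = (n * d ^ (p - 2).toNat) % p →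
      (l.foldl (fun f j => if j ≠ i then
          (-1 * f * X j * quickpower (D j) (p - 2) p) % p else f) acc) % p
      = ((l.foldl (fun nd j => if j ≠ i then
          (((-(X j)) * nd.1) % p, (nd.2 * D j) % p) else nd) (n, d)).1
         * (l.foldl (fun nd j => if j ≠ i then
          (((-(X j)) * nd.1) % p, (nd.2 * D j) % p) else nd) (n, d)).2
           ^ (p - 2).toNat) % p := by
  intro l
  induction l with
  | nil => intro acc n d h; simpa using h
  | cons j l ih =>
    intro acc n d h
    by_cases hji : j ≠ i
    · simp only [List.foldl_cons, if_pos hji]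
      apply ih
      rw [emod_emod_self, quickpower_eq' _ _ _ hp (by omega), mul_emod_right',
        mul_emod_left', mul_pow_emod]
      rw [show -1 * acc * X j * D j ^ (p - 2).toNat
            = acc * (-1 * X j * D j ^ (p - 2).toNat) from by ring]
      rw [← mul_emod_left' acc, h, mul_emod_left']
      congr 1
      rw [mul_pow]
      ring
    · simp only [List.foldl_cons, if_neg hji]
      exact ih acc n d h

lemma term_eq (x : List Int) (fx : List Int) (t p : Int) (hp : 2 ≤ p) (ans i : Int) :
    (ans + ((PySem.List.pyRange 0 t 1).foldl (fun fxi j =>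
        if j ≠ i then
          (-1 * fxi * (PySem.List.pyGetD x j 0) *
            quickpower ((PySem.List.pyGetD x i 0) - (PySem.List.pyGetD x j 0)) (p - 2) p) % p
        else fxi) 1
      * ((PySem.List.pyGetD fx i 0) % p)) % p) % p
    = (ans + (((PySem.List.pyGetD fx i 0) % p
        * ((PySem.List.pyRange 0 t 1).foldl (fun nd j =>
            if j ≠ i then
              (((-(PySem.List.pyGetD x j 0)) * nd.1) % p,
               (nd.2 * ((PySem.List.pyGetD x i 0) - PySem.List.pyGetD x j 0)) % p)
            else nd) (1, 1)).1) % p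
      * quickpower ((PySem.List.pyRange 0 t 1).foldl (fun nd j =>
            if j ≠ i then
              (((-(PySem.List.pyGetD x j 0)) * nd.1) % p,
               (nd.2 * ((PySem.List.pyGetD x i 0) - PySem.List.pyGetD x j 0)) % p)
            else nd) (1, 1)).2 (p - 2) p) % p) % p := by
  have hinner := inner_fold_eq p hp i (fun j => PySem.List.pyGetD x j 0)
    (fun j => PySem.List.pyGetD x i 0 - PySem.List.pyGetD x j 0) (PySem.List.pyRange 0 t 1)
    1 1 1 (by rw [one_mul, one_pow])
  dsimp only at hinner
  congr 1
  rw [quickpower_eq' _ _ _ hp (by omega)]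
  congr 1
  set e := (p - 2).toNat with he
  set u := PySem.List.pyGetD fx i 0 % p with hu
  set F := (PySem.List.pyRange 0 t 1).foldl (fun fxi j =>
        if j ≠ i then
          (-1 * fxi * (PySem.List.pyGetD x j 0) *
            quickpower ((PySem.List.pyGetD x i 0) - (PySem.List.pyGetD x j 0)) (p - 2) p) % p
        else fxi) 1 with hF
  set nd := (PySem.List.pyRange 0 t 1).foldl (fun nd j =>
            if j ≠ i then
              (((-(PySem.List.pyGetD x j 0)) * nd.1) % p,
               (nd.2 * ((PySem.List.pyGetD x i 0) - PySem.List.pyGetD x j 0)) % p)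
            else nd) (1, 1) with hnd
  calc F * u % p
      = F % p * (u % p) % p := Int.mul_emod _ _ _
    _ = (nd.1 * nd.2 ^ e % p) * (u % p) % p := by rw [hinner]
    _ = nd.1 * nd.2 ^ e * u % p := (Int.mul_emod _ _ _).symm
    _ = u * nd.1 * nd.2 ^ e % p := by congr 1; ring
    _ = (u * nd.1) * (nd.2 ^ e % p) % p := (mul_emod_right' _ _ _).symm
    _ = (u * nd.1 % p) * (nd.2 ^ e % p) % p := (mul_emod_left' _ _ _).symm

lemma range_empty_of_nonpos (t : Int) (ht : t ≤ 0) : PySem.List.pyRange 0 t 1 = [] := by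
  rw [PySem.List.pyRange_one]
  simp
  omega

-- ===== VERDICT (by name: the statement is the Claim_ definition above) =====
theorem restructure_polynomial_spec : Claim_equal_restructure_polynomial := by
  intro x fx t p _ hpre
  obtain ⟨-, -, hp | ht⟩ := hpre
  · show restructure_polynomial x fx t p = restructure_polynomial_alt x fx t p
    unfold restructure_polynomial restructure_polynomial_alt
    congr 1
    funext ans i
    dsimp only
    simp only [PySem.Int.mod_eq_emod_of_pos (show (0:Int) < p by omega)]
    exact term_eq x fx t p hp ans i
  · show restructure_polynomial x fx t p = restructure_polynomial_alt x fx t p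
    unfold restructure_polynomial restructure_polynomial_alt
    rw [range_empty_of_nonpos t ht]
    rfl
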